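-- pv_equiv track=rewrite | github.com/MolnAtt/aoc_2023 | 2/2.py | minrgb
-- ===== SOURCE A (Python) =====
-- def minrgb(huzassorozat:list[(int,int,int)]) -> (int,int,int):
--     minr = 0
--     ming = 0
--     minb = 0
--     for r,g,b in huzassorozat:
--         minr = max(minr,r)
--         ming = max(ming,g)
--         minb = max(minb,b)
--     return (minr, ming, minb)
-- ===== SOURCE B (Python) =====
-- def minrgb(huzassorozat):
--     n = len(huzassorozat)
--     if n == 0:
--         return (0, 0, 0)
--     if n == 1:
--         r, g, b = huzassorozat[0]
--         return (max(r, 0), max(g, 0), max(b, 0))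
--     mid = n // 2
--     lr, lg, lb = minrgb(huzassorozat[:mid])
--     rr, rg, rb = minrgb(huzassorozat[mid:])
--     return (max(lr, rr), max(lg, rg), max(lb, rb))
-- ===== Notes on version B (the rewrite author's own statement) =====
-- stated objective: alternative
-- what changed: Replaces the linear three-accumulator pass by a divide-and-conquer recursion: split the list in half, recursively compute each half's channel maxima (floored at 0 in the singleton base case), and merge with componentwise max.
import Mathlib
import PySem

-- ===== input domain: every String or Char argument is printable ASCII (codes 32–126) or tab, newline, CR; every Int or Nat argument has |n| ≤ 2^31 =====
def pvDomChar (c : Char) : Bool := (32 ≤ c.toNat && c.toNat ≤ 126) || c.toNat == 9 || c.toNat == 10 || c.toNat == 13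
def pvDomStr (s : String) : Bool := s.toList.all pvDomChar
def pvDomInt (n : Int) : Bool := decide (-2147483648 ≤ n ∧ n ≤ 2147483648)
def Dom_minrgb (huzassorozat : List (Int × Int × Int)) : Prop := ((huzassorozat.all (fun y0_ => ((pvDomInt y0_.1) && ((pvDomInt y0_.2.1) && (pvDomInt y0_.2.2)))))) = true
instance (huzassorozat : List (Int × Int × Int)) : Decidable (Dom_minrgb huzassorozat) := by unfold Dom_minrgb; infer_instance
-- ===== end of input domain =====

-- B replaces A's single accumulator pass by a divide-and-conquer recursion (alternative decomposition, same O(n) cost).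

-- ===== PORT A =====
-- A: one pass over the rows with three max-accumulators started at 0.
def minrgb (huzassorozat : List (Int × Int × Int)) : Int × Int × Int :=
  huzassorozat.foldl (fun acc rgb => (max acc.1 rgb.1, max acc.2.1 rgb.2.1, max acc.2.2 rgb.2.2)) (0, 0, 0)

-- ===== PORT B =====
-- B: divide and conquer; halve the list, recurse, merge with componentwise max.
-- Python slices h[:mid] / h[mid:] with 0 ≤ mid ≤ len are exactly List.take mid / List.drop mid.
def minrgb_alt (huzassorozat : List (Int × Int × Int)) : Int × Int × Int :=
  if huzassorozat.length = 0 then (0, 0, 0)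
  else if huzassorozat.length = 1 then
    match huzassorozat with
    | [] => (0, 0, 0)
    | (r, g, b) :: _ => (max r 0, max g 0, max b 0)
  else
    let mid := huzassorozat.length / 2
    let L := minrgb_alt (huzassorozat.take mid)
    let R := minrgb_alt (huzassorozat.drop mid)
    (max L.1 R.1, max L.2.1 R.2.1, max L.2.2 R.2.2)
termination_by huzassorozat.length
decreasing_by
  · simp; omega
  · simp; omega

-- ===== PRECONDITION & SPEC =====
def Spec_minrgb (huzassorozat : List (Int × Int × Int)) (out : Int × Int × Int) : Prop := out = minrgb_alt huzassorozat
instance (huzassorozat : List (Int × Int × Int)) (out : Int × Int × Int) : Decidable (Spec_minrgb huzassorozat out) := by unfold Spec_minrgb; infer_instance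

-- ===== CLAIM (what is proved, stated in full; the proofs are below) =====
def Claim_equal_minrgb : Prop := ∀ (huzassorozat : List (Int × Int × Int)), Dom_minrgb huzassorozat → Spec_minrgb huzassorozat (minrgb huzassorozat)

-- ===== LEMMAS AND PROOFS =====

theorem pv_fold_split (l : List (Int × Int × Int)) (a b c : Int) :
    l.foldl (fun acc rgb => (max acc.1 rgb.1, max acc.2.1 rgb.2.1, max acc.2.2 rgb.2.2)) (a, b, c)
      = ((l.map (·.1)).foldl max a, (l.map (·.2.1)).foldl max b, (l.map (·.2.2)).foldl max c) := by
  induction l generalizing a b c with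
  | nil => rfl
  | cons h t ih => simp [List.foldl, ih]

theorem pv_foldl_max_max (l : List Int) (a b : Int) :
    l.foldl max (max a b) = max a (l.foldl max b) := by
  induction l generalizing b with
  | nil => rfl
  | cons h t ih => simp [List.foldl, ← ih, max_assoc]

theorem pv_foldl_max_nonneg (l : List Int) : 0 ≤ l.foldl max 0 := by
  have : ∀ a : Int, a ≤ l.foldl max a := by
    intro a
    induction l generalizing a with
    | nil => simp [List.foldl]
    | cons h t ih => exact le_trans (le_max_left a h) (ih _)
  exact this 0

theorem pv_foldl_max_append (l₁ l₂ : List Int) :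
    (l₁ ++ l₂).foldl max 0 = max (l₁.foldl max 0) (l₂.foldl max 0) := by
  rw [List.foldl_append]
  have h := pv_foldl_max_max l₂ (l₁.foldl max 0) 0
  rw [max_eq_left (pv_foldl_max_nonneg l₁)] at h
  exact h

theorem pv_alt_eq (l : List (Int × Int × Int)) :
    minrgb_alt l = ((l.map (·.1)).foldl max 0, (l.map (·.2.1)).foldl max 0, (l.map (·.2.2)).foldl max 0) := by
  have H : ∀ n (l : List (Int × Int × Int)), l.length ≤ n →
      minrgb_alt l = ((l.map (·.1)).foldl max 0, (l.map (·.2.1)).foldl max 0, (l.map (·.2.2)).foldl max 0) := by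
    intro n
    induction n with
    | zero =>
      intro l hl
      have hnil : l = [] := List.length_eq_zero_iff.mp (Nat.le_zero.mp hl)
      subst hnil
      rw [minrgb_alt.eq_def]
      rfl
    | succ n ih =>
      intro l hl
      rw [minrgb_alt.eq_def]
      split_ifs with h0 h1
      · have hnil : l = [] := List.length_eq_zero_iff.mp h0
        subst hnil; rfl
      · match l, h1 with
        | [(r, g, b)], _ => simp [List.foldl, max_comm]
      · have hmidlt : l.length / 2 < l.length := by omega
        have h1le : 1 ≤ l.length / 2 := by omega
        dsimp only
        rw [ih (l.take (l.length / 2)) (by simp; omega),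
            ih (l.drop (l.length / 2)) (by simp; omega)]
        have hsplit : l = l.take (l.length / 2) ++ l.drop (l.length / 2) :=
          (List.take_append_drop _ l).symm
        conv_rhs => rw [hsplit]
        simp only [List.map_append, pv_foldl_max_append]
  exact H l.length l le_rfl

-- ===== VERDICT (by name: the statement is the Claim_ definition above) =====
theorem minrgb_spec : Claim_equal_minrgb := by
  intro l _
  unfold Spec_minrgb
  rw [minrgb, pv_fold_split, pv_alt_eq]
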